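-- pv_equiv track=rewrite | github.com/fast-crypto-lab/Frobenius_AFFT | affft.py | sparse_s_poly
-- ===== SOURCE A (Python) =====
-- def sparse_s_poly(k):
--     if k==0:
--         return [1]
--     else:
--         p = sparse_s_poly(k-1)
--         #sparse mul
--         ret = set()
--         q=list(p)
--         if 0 in q:
--             q.remove(0)
--         else:
--             q.insert(0,0)
--
--         for i in p:
--             for j in q:
--                 if i+j not in ret:
--                     ret.add(i+j)
--                 else:
--                     ret.remove(i+j)
--
--         return sorted(list(ret))
-- ===== SOURCE B (Python) =====
-- # Frobenius: over GF(2), s_k = s_{k-1}*(s_{k-1}+1) = s_{k-1}^2 + s_{k-1},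
-- # and squaring just doubles every exponent, so each level is a single
-- # symmetric difference instead of A's quadratic toggle over all pairs.
-- def sparse_s_poly(k):
--     s = {1}
--     for _ in range(k):
--         s = {2 * e for e in s} ^ s
--     return sorted(s)
-- ===== Notes on version B (the rewrite author's own statement) =====
-- stated objective: faster
-- what changed: Instead of the quadratic parity-toggle over all exponent pairs drawn from the previous level's polynomial and its constant-toggled copy, B uses the GF(2) Frobenius identity p*(p+1) = {2e : e in p} symmetric-difference p, so each level is one linear set pass and the recursion becomes an iterative loop. Pre_ excludes only negative k, where A's recursion never reaches its base case and raises RecursionError while B returns [1].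
import Mathlib
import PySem

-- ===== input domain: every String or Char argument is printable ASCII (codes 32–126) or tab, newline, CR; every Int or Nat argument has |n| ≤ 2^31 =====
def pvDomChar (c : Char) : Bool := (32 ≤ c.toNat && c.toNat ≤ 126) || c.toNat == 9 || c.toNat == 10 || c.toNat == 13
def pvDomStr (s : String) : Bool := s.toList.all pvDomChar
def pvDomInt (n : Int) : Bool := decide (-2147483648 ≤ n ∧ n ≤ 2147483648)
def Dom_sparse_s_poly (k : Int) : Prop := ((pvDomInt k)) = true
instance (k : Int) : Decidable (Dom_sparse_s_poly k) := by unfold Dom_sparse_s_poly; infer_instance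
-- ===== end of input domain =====

-- B replaces A's quadratic pairwise parity-toggle per level by the GF(2) Frobenius
-- identity p*(p+1) = {2e : e ∈ p} △ p, one linear symmetric difference per level.

-- ===== PORT A =====
-- 'if i+j not in ret: ret.add(i+j) else: ret.remove(i+j)'
def sparse_toggle (r : PySem.Set Int) (v : Int) : PySem.Set Int :=
  if v ∉ r then PySem.Set.add r v else (PySem.Set.remove? r v).getD r

def sparseA_go : Nat → List Int
  | 0 => [1]
  | n+1 =>
    let p := sparseA_go n
    -- q = list(p); if 0 in q: q.remove(0) else: q.insert(0, 0)
    let q := if (0:Int) ∈ p then (PySem.List.remove? p 0).getD p else PySem.List.insert p 0 0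
    let ret := p.foldl (fun r i => q.foldl (fun r j => sparse_toggle r (i+j)) r)
                 (PySem.Set.empty (α := Int))
    PySem.List.sorted ret (fun x => x) false

-- A recurses on k; it terminates only for k ≥ 0 (Pre_), where the depth is k.toNat.
def sparse_s_poly (k : Int) : List Int := sparseA_go k.toNat

-- ===== PORT B =====
def sparse_s_poly_alt (k : Int) : List Int :=
  PySem.List.sorted
    ((List.range k.toNat).foldl
      (fun s _ => PySem.Set.symmDiff (PySem.Set.ofList (List.map (fun e => 2*e) s)) s)
      (PySem.Set.ofList [1]))
    (fun x => x) false

-- ===== PRECONDITION & SPEC =====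
-- Pre_ excludes only negative k, where A's recursion never reaches its base case
-- and raises RecursionError.
def Pre_sparse_s_poly (k : Int) : Prop := 0 ≤ k
instance (k : Int) : Decidable (Pre_sparse_s_poly k) := by unfold Pre_sparse_s_poly; infer_instance
def pvWitness_sparse_s_poly : Int := (3)

def Spec_sparse_s_poly (k : Int) (out : List Int) : Prop := out = sparse_s_poly_alt k
instance (k : Int) (out : List Int) : Decidable (Spec_sparse_s_poly k out) := by unfold Spec_sparse_s_poly; infer_instance

-- ===== CLAIM (what is proved, stated in full; the proofs are below) =====
def Claim_equal_sparse_s_poly : Prop := ∀ (k : Int), Dom_sparse_s_poly k → Pre_sparse_s_poly k → Spec_sparse_s_poly k (sparse_s_poly k)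

-- ===== LEMMAS AND PROOFS =====

-- B's level step and the iterated loop state, named for the proofs (defeq to the port's body).
def sparseB_step (s : PySem.Set Int) : PySem.Set Int :=
  PySem.Set.symmDiff (PySem.Set.ofList (List.map (fun e => 2*e) s)) s

def sparseB_iter (n : Nat) : PySem.Set Int :=
  (List.range n).foldl (fun s _ => sparseB_step s) (PySem.Set.ofList [1])

lemma sparseB_iter_succ (n : Nat) : sparseB_iter (n+1) = sparseB_step (sparseB_iter n) := by
  simp [sparseB_iter, List.range_succ]

lemma nodup_sparseB_iter (n : Nat) : (sparseB_iter n).Nodup := by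
  induction n with
  | zero => decide
  | succ n ih =>
      rw [sparseB_iter_succ]
      exact PySem.Set.nodup_symmDiff _ _ (PySem.Set.nodup_ofList _) ih

lemma mem_sparseB_step (s : PySem.Set Int) (x : Int) :
    x ∈ sparseB_step s ↔ Xor' (∃ h ∈ s, x = 2*h) (x ∈ s) := by
  simp only [sparseB_step, PySem.Set.mem_symmDiff, PySem.Set.mem_ofList, List.mem_map, Xor']
  constructor
  · rintro (⟨⟨h, hh, rfl⟩, hn⟩ | ⟨hm, hn⟩)
    · exact Or.inl ⟨⟨h, hh, rfl⟩, hn⟩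
    · exact Or.inr ⟨hm, fun ⟨h, hh, hx⟩ => hn ⟨h, hh, hx.symm⟩⟩
  · rintro (⟨⟨h, hh, hx⟩, hn⟩ | ⟨hm, hn⟩)
    · exact Or.inl ⟨⟨h, hh, hx.symm⟩, hn⟩
    · exact Or.inr ⟨hm, fun ⟨h, hh, hx⟩ => hn ⟨h, hh, hx.symm⟩⟩

lemma mem_sparse_toggle (r : PySem.Set Int) (_hr : r.Nodup) (v y : Int) :
    y ∈ sparse_toggle r v ↔ Xor' (y ∈ r) (y = v) := by
  by_cases h : v ∈ r
  · rw [sparse_toggle, if_neg (by simpa using h), PySem.Set.remove?_of_mem h,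
      Option.getD_some, PySem.Set.mem_discard]
    simp only [Xor']
    constructor
    · rintro ⟨hy, hne⟩; exact Or.inl ⟨hy, hne⟩
    · rintro (⟨hy, hne⟩ | ⟨rfl, hn⟩)
      · exact ⟨hy, hne⟩
      · exact absurd h hn
  · rw [sparse_toggle, if_pos h, PySem.Set.mem_add]
    simp only [Xor']
    constructor
    · rintro (hy | rfl)
      · exact Or.inl ⟨hy, fun hyv => h (hyv ▸ hy)⟩
      · exact Or.inr ⟨rfl, h⟩
    · rintro (⟨hy, _⟩ | ⟨rfl, _⟩) <;> [exact Or.inl hy; exact Or.inr rfl]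

lemma nodup_sparse_toggle (r : PySem.Set Int) (hr : r.Nodup) (v : Int) :
    (sparse_toggle r v).Nodup := by
  by_cases h : v ∈ r
  · rw [sparse_toggle, if_neg (by simpa using h), PySem.Set.remove?_of_mem h, Option.getD_some]
    exact PySem.Set.nodup_discard _ _ hr
  · rw [sparse_toggle, if_pos h]
    exact PySem.Set.nodup_add _ _ hr

lemma mem_foldl_toggle (L : List Int) (r : PySem.Set Int) (hr : r.Nodup) :
    (L.foldl sparse_toggle r).Nodup ∧
      ∀ y, (y ∈ L.foldl sparse_toggle r ↔ Xor' (y ∈ r) (Odd (L.count y))) := by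
  induction L generalizing r with
  | nil => exact ⟨hr, fun y => by simp [Xor', Nat.odd_iff]⟩
  | cons a L ih =>
      obtain ⟨hn, hm⟩ := ih (sparse_toggle r a) (nodup_sparse_toggle r hr a)
      refine ⟨hn, fun y => ?_⟩
      rw [List.foldl_cons, hm y, mem_sparse_toggle r hr a y, List.count_cons]
      by_cases hya : y = a
      · subst hya
        simp only [BEq.rfl, if_true, Nat.odd_add_one, Xor']
        tauto
      · have hne : (a == y) = false := by simp [Ne.symm hya]
        simp only [hne, Bool.false_eq_true, if_false, add_zero, Xor', hya]
        tauto

lemma foldl_foldl_eq_flatMap (p q : List Int) (r : PySem.Set Int) :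
    p.foldl (fun r i => q.foldl (fun r j => sparse_toggle r (i+j)) r) r
      = (p.flatMap (fun i => q.map (fun j => i + j))).foldl sparse_toggle r := by
  induction p generalizing r with
  | nil => rfl
  | cons i p ih =>
      rw [List.foldl_cons, List.flatMap_cons, List.foldl_append, ih, List.foldl_map]

lemma count_flatMap_sum (y : Int) (p q : List Int) :
    (p.flatMap (fun i => q.map (fun j => i + j))).count y
      = (p.map (fun i => q.count (y - i))).sum := by
  induction p with
  | nil => rfl
  | cons i p ih =>
      rw [List.flatMap_cons, List.count_append, ih, List.map_cons, List.sum_cons]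
      congr 1
      have := List.count_map_of_injective (f := fun j => i + j) q
        (fun a b h => by simpa using h) (y - i)
      simpa using this

lemma sum_count_eq_countP (p q : List Int) (hq : q.Nodup) (y : Int) :
    (p.map (fun i => q.count (y - i))).sum = p.countP (fun i => decide ((y - i) ∈ q)) := by
  induction p with
  | nil => rfl
  | cons i p ih =>
      rw [List.map_cons, List.sum_cons, List.countP_cons, ih]
      by_cases h : (y - i) ∈ q
      · rw [List.count_eq_one_of_mem hq h]; simp [h, Nat.add_comm]
      · rw [List.count_eq_zero_of_not_mem h]; simp [h]

lemma even_card_of_no_fixed (T : Finset ℤ) (x : ℤ)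
    (hmem : ∀ i ∈ T, x - i ∈ T) (hne : ∀ i ∈ T, x - i ≠ i) : Even T.card := by
  have h0 : ∑ _i ∈ T, (1 : ZMod 2) = 0 :=
    Finset.sum_involution (fun i _ => x - i) (fun a _ => by decide)
      (fun a ha _ => hne a ha) hmem (fun a _ => by ring)
  rw [Finset.sum_const, nsmul_eq_mul, mul_one] at h0
  have h2 : (2:ℕ) ∣ T.card := Fin.natCast_eq_zero.mp h0
  obtain ⟨c, hc⟩ := h2
  exact ⟨c, by omega⟩

lemma odd_card_filter_pair (P : Finset ℤ) (x : ℤ) :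
    Odd (P.filter (fun i => x - i ∈ P)).card ↔ ∃ h ∈ P, x = 2*h := by
  set S := P.filter (fun i => x - i ∈ P) with hS
  have hSmem : ∀ i, i ∈ S ↔ i ∈ P ∧ x - i ∈ P := fun i => by simp [hS]
  by_cases hfix : ∃ h ∈ P, x = 2*h
  · obtain ⟨h, hP, hx⟩ := hfix
    have hxh : x - h = h := by omega
    have hhS : h ∈ S := (hSmem h).mpr ⟨hP, by rw [hxh]; exact hP⟩
    have hcard : (S.erase h).card + 1 = S.card := Finset.card_erase_add_one hhS
    have heven : Even (S.erase h).card := by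
      apply even_card_of_no_fixed (x := x)
      · intro i hi
        have hih := (Finset.mem_erase.mp hi).1
        obtain ⟨hiP, hxiP⟩ := (hSmem i).mp (Finset.mem_erase.mp hi).2
        refine Finset.mem_erase.mpr ⟨fun hc => hih (by omega), (hSmem _).mpr ⟨hxiP, ?_⟩⟩
        simpa [sub_sub_cancel] using hiP
      · intro i hi hc
        exact (Finset.mem_erase.mp hi).1 (by omega)
    refine ⟨fun _ => ⟨h, hP, hx⟩, fun _ => ?_⟩
    rw [← hcard]
    exact Even.add_one heven
  · have heven : Even S.card := by
      apply even_card_of_no_fixed (x := x)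
      · intro i hi
        obtain ⟨hiP, hxiP⟩ := (hSmem i).mp hi
        exact (hSmem _).mpr ⟨hxiP, by simpa [sub_sub_cancel] using hiP⟩
      · intro i hi hc
        obtain ⟨hiP, _⟩ := (hSmem i).mp hi
        exact hfix ⟨i, hiP, by omega⟩
    exact ⟨fun hodd => absurd hodd (Nat.not_odd_iff_even.mpr heven),
      fun he => absurd he hfix⟩

lemma card_filter_erase (P : Finset ℤ) (x : ℤ) (hx : x ∈ P) (pr : ℤ → Prop)
    [DecidablePred pr] :
    (P.filter pr).card = ((P.erase x).filter pr).card + if pr x then 1 else 0 := by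
  conv_lhs => rw [← Finset.insert_erase hx]
  rw [Finset.filter_insert]
  by_cases h : pr x
  · rw [if_pos h, if_pos h,
      Finset.card_insert_of_notMem (fun hc => Finset.notMem_erase x _ (Finset.mem_filter.mp hc).1)]
  · rw [if_neg h, if_neg h, add_zero]

lemma odd_countP_q (p q : List Int) (hp : p.Nodup)
    (hq : ∀ y, y ∈ q ↔ Xor' (y ∈ p) (y = 0)) (x : Int) :
    Odd (p.countP (fun i => decide ((x - i) ∈ q)))
      ↔ Xor' (∃ h ∈ p, x = 2*h) (x ∈ p) := by
  have hfin : (List.filter (fun i => decide (x - i ∈ q)) p).toFinset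
      = p.toFinset.filter (fun i => (x - i) ∈ q) := by
    ext i; simp
  have hcount : p.countP (fun i => decide ((x - i) ∈ q))
      = (p.toFinset.filter (fun i => (x - i) ∈ q)).card := by
    rw [List.countP_eq_length_filter, ← hfin, List.card_toFinset,
      List.Nodup.dedup (hp.filter _)]
  have hNp := odd_card_filter_pair p.toFinset x
  have hxx : x - x = (0:Int) := by ring
  rw [hcount]
  by_cases hx : x ∈ p
  · have hxP : x ∈ p.toFinset := List.mem_toFinset.mpr hx
    have hcongr : (p.toFinset.erase x).filter (fun i => (x - i) ∈ q)
        = (p.toFinset.erase x).filter (fun i => x - i ∈ p.toFinset) := by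
      apply Finset.filter_congr
      intro i hi
      have hix : i ≠ x := Finset.ne_of_mem_erase hi
      have h0 : ¬ (x - i = 0) := fun hc => hix (by omega)
      rw [hq (x - i)]
      simp [Xor', h0]
    have hA := card_filter_erase p.toFinset x hxP (fun i => (x - i) ∈ q)
    have hB := card_filter_erase p.toFinset x hxP (fun i => x - i ∈ p.toFinset)
    simp only [hxx] at hA hB
    rw [hcongr] at hA
    have h0pq : ((0:Int) ∈ q) ↔ ¬ ((0:Int) ∈ p) := by
      rw [hq 0]; simp [Xor']
    have hflip : Odd ((p.toFinset.filter (fun i => (x - i) ∈ q)).card)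
        ↔ ¬ Odd ((p.toFinset.filter (fun i => x - i ∈ p.toFinset)).card) := by
      rw [hA, hB]
      by_cases h0p : (0:Int) ∈ p
      · rw [if_neg (fun hc => (h0pq.mp hc) h0p), if_pos (List.mem_toFinset.mpr h0p), add_zero,
          Nat.odd_add_one, not_not]
      · rw [if_pos (h0pq.mpr h0p), if_neg (fun hc => h0p (List.mem_toFinset.mp hc)), add_zero,
          Nat.odd_add_one]
    rw [hflip, hNp]
    simp [Xor', hx]
  · have hcongr : p.toFinset.filter (fun i => (x - i) ∈ q)
        = p.toFinset.filter (fun i => x - i ∈ p.toFinset) := by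
      apply Finset.filter_congr
      intro i hi
      have hix : i ≠ x := fun hc => hx (hc ▸ List.mem_toFinset.mp hi)
      have h0 : ¬ (x - i = 0) := fun hc => hix (by omega)
      rw [hq (x - i)]
      simp [Xor', h0]
    rw [hcongr, hNp]
    simp [Xor', hx]

lemma levelA_mem (p q : List Int) (hp : p.Nodup) (hqn : q.Nodup)
    (hq : ∀ y, y ∈ q ↔ Xor' (y ∈ p) (y = 0)) (x : Int) :
    x ∈ p.foldl (fun r i => q.foldl (fun r j => sparse_toggle r (i+j)) r)
          (PySem.Set.empty (α := Int))
      ↔ Xor' (∃ h ∈ p, x = 2*h) (x ∈ p) := by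
  rw [foldl_foldl_eq_flatMap]
  obtain ⟨_, hm⟩ := mem_foldl_toggle (p.flatMap (fun i => q.map (fun j => i + j)))
    (PySem.Set.empty (α := Int)) List.nodup_nil
  rw [hm x, count_flatMap_sum, sum_count_eq_countP p q hqn]
  have hemp : Xor' (x ∈ PySem.Set.empty (α := Int))
      (Odd (p.countP (fun i => decide ((x - i) ∈ q))))
      ↔ Odd (p.countP (fun i => decide ((x - i) ∈ q))) := by
    simp [Xor', PySem.Set.empty]
  rw [hemp, odd_countP_q p q hp hq x]

lemma q_spec (p : List Int) (hp : p.Nodup) :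
    ((if (0:Int) ∈ p then (PySem.List.remove? p 0).getD p else PySem.List.insert p 0 0).Nodup)
      ∧ ∀ y, (y ∈ (if (0:Int) ∈ p then (PySem.List.remove? p 0).getD p else PySem.List.insert p 0 0)
            ↔ Xor' (y ∈ p) (y = 0)) := by
  split_ifs with h
  · rw [PySem.List.remove?_eq_some_erase p 0 h, Option.getD_some]
    refine ⟨hp.erase 0, fun y => ?_⟩
    rw [hp.mem_erase_iff]
    constructor
    · rintro ⟨hne, hy⟩; exact Or.inl ⟨hy, hne⟩
    · rintro (⟨hy, hne⟩ | ⟨rfl, hn⟩)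
      · exact ⟨hne, hy⟩
      · exact absurd h hn
  · rw [PySem.List.insert_zero]
    refine ⟨List.nodup_cons.mpr ⟨h, hp⟩, fun y => ?_⟩
    rw [List.mem_cons]
    constructor
    · rintro (rfl | hy)
      · exact Or.inr ⟨rfl, h⟩
      · exact Or.inl ⟨hy, fun hc => h (hc ▸ hy)⟩
    · rintro (⟨hy, _⟩ | ⟨rfl, _⟩) <;> [exact Or.inr hy; exact Or.inl rfl]

lemma level_step (p : List Int) (hpn : p.Nodup) (s : PySem.Set Int) (hsn : s.Nodup)
    (hpmem : ∀ y, y ∈ p ↔ y ∈ s) :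
    PySem.List.sorted
        (p.foldl
          (fun r i =>
            (if (0:Int) ∈ p then (PySem.List.remove? p 0).getD p
              else PySem.List.insert p 0 0).foldl
              (fun r j => sparse_toggle r (i+j)) r)
          (PySem.Set.empty (α := Int)))
        (fun x => x) false
      = PySem.List.sorted (sparseB_step s) (fun x => x) false := by
  obtain ⟨hqn, hqmem⟩ := q_spec p hpn
  apply (PySem.List.sorted_id_eq_sorted_id_iff_perm _ _).mpr
  have hretn : (p.foldl
      (fun r i =>
        (if (0:Int) ∈ p then (PySem.List.remove? p 0).getD p
          else PySem.List.insert p 0 0).foldl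
          (fun r j => sparse_toggle r (i+j)) r)
      (PySem.Set.empty (α := Int))).Nodup := by
    rw [foldl_foldl_eq_flatMap]
    exact (mem_foldl_toggle _ _ List.nodup_nil).1
  have hstepn : (sparseB_step s).Nodup :=
    PySem.Set.nodup_symmDiff _ _ (PySem.Set.nodup_ofList _) hsn
  apply (List.perm_ext_iff_of_nodup hretn hstepn).mpr
  intro x
  rw [levelA_mem p _ hpn hqn hqmem x, mem_sparseB_step]
  constructor
  · rintro (⟨⟨h, hh, hx⟩, hn⟩ | ⟨hm, hn⟩)
    · exact Or.inl ⟨⟨h, (hpmem h).mp hh, hx⟩, fun hc => hn ((hpmem x).mpr hc)⟩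
    · exact Or.inr ⟨(hpmem x).mp hm, fun ⟨h, hh, hx⟩ => hn ⟨h, (hpmem h).mpr hh, hx⟩⟩
  · rintro (⟨⟨h, hh, hx⟩, hn⟩ | ⟨hm, hn⟩)
    · exact Or.inl ⟨⟨h, (hpmem h).mpr hh, hx⟩, fun hc => hn ((hpmem x).mp hc)⟩
    · exact Or.inr ⟨(hpmem x).mpr hm, fun ⟨h, hh, hx⟩ => hn ⟨h, (hpmem h).mp hh, hx⟩⟩

lemma A_eq_sortedB (n : Nat) :
    sparseA_go n = PySem.List.sorted (sparseB_iter n) (fun x => x) false := by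
  induction n with
  | zero => decide
  | succ n ih =>
      have key : sparseA_go (n+1)
          = PySem.List.sorted
              ((sparseA_go n).foldl
                (fun r i =>
                  (if (0:Int) ∈ sparseA_go n then (PySem.List.remove? (sparseA_go n) 0).getD (sparseA_go n)
                    else PySem.List.insert (sparseA_go n) 0 0).foldl
                    (fun r j => sparse_toggle r (i+j)) r)
                (PySem.Set.empty (α := Int)))
              (fun x => x) false := rfl
      have hpn : (sparseA_go n).Nodup := by
        rw [ih]
        exact ((PySem.List.sorted_perm _ _ _).nodup_iff).mpr (nodup_sparseB_iter n)
      have hpmem : ∀ y, y ∈ sparseA_go n ↔ y ∈ sparseB_iter n := by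
        intro y; rw [ih, PySem.List.mem_sorted]
      rw [key, level_step (sparseA_go n) hpn (sparseB_iter n) (nodup_sparseB_iter n) hpmem,
        sparseB_iter_succ]

-- ===== VERDICT (by name: the statement is the Claim_ definition above) =====
theorem sparse_s_poly_spec : Claim_equal_sparse_s_poly := by
  intro k _ _
  show sparse_s_poly k = sparse_s_poly_alt k
  rw [sparse_s_poly, A_eq_sortedB]
  rfl
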